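-- pv_equiv track=rewrite | github.com/MarcusNolkrantz/Guitar-Hero-Project | assembler/source/cleaner.py | clean_labels
-- ===== SOURCE A (Python) =====
-- def clean_labels(data):
--     to_remove = []
--     for i in range(len(data) - 1):
--         found = data[i].find(":")
--         if found is not -1:
--             to_remove.append(i)
--     to_remove = to_remove[::-1]
--     for i in to_remove:
--         data.pop(i)
--     return data
-- ===== SOURCE B (Python) =====
-- def clean_labels(data):
--     n = len(data)
--     write = 0
--     for i in range(n):
--         if i == n - 1 or data[i].find(":") == -1:
--             data[write] = data[i]
--             write += 1
--     del data[write:]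
--     return data
-- ===== Notes on version B (the rewrite author's own statement) =====
-- stated objective: simpler
-- what changed: A collects the indices of ':'-containing entries (all but the last position), reverses the index list and pops each one out of the list; B does a single forward in-place compaction with a write pointer and truncates, never building an index list or popping.
import Mathlib
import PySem

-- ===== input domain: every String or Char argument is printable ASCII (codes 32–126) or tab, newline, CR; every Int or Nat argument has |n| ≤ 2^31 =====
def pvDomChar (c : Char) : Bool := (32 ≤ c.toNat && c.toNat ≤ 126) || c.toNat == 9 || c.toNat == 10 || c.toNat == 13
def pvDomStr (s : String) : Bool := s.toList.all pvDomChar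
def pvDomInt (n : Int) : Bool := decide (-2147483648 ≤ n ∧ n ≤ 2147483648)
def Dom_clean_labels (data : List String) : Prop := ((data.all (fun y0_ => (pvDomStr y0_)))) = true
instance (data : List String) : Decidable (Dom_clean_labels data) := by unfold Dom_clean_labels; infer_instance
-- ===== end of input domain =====

-- B replaces A's collect-indices-then-pop-backwards with a single forward in-place
-- compaction (write pointer); equivalence is about the returned list — both Pythons
-- mutate `data` in place and return the same object with the same final contents.

-- ===== PORT A =====
-- literal port: collect the indices to remove (all but the last position whose
-- element contains ':'), reverse them with [::-1], then pop each in turn.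
def clean_labels (data : List String) : List String :=
  let to_remove : List Int :=
    (PySem.List.pyRange 0 ((data.length : Int) - 1) 1).foldl
      (fun acc i =>
        let found := PySem.Str.find (PySem.List.pyGetD data i "") ":"
        if found ≠ -1 then acc ++ [i] else acc) []
  let to_remove := (PySem.List.slice? to_remove none none (-1)).getD []
  to_remove.foldl
    (fun d i =>
      match PySem.List.pop? d i with
      | some r => r.2
      | none => d) data

-- ===== PORT B =====
-- port of Source B's compaction loop: `written` is the already-compacted prefix
-- data[0:write]; `del data[write:]` truncates the list to exactly that prefix,
-- so the returned list is `written` after the loop.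
def clean_labels_alt (data : List String) : List String :=
  let n : Int := (data.length : Int)
  (PySem.List.pyRange 0 n 1).foldl
    (fun written i =>
      if i = n - 1 ∨ PySem.Str.find (PySem.List.pyGetD data i "") ":" = -1 then
        written ++ [PySem.List.pyGetD data i ""]
      else written) []

-- ===== PRECONDITION & SPEC =====
def Spec_clean_labels (data : List String) (out : List String) : Prop := out = clean_labels_alt data
instance (data : List String) (out : List String) : Decidable (Spec_clean_labels data out) := by unfold Spec_clean_labels; infer_instance

-- ===== CLAIM (what is proved, stated in full; the proofs are below) =====
def Claim_equal_clean_labels : Prop := ∀ (data : List String), Dom_clean_labels data → Spec_clean_labels data (clean_labels data)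

-- ===== LEMMAS AND PROOFS =====

-- the common normal form both ports are reduced to: keep every element of the
-- first n-1 positions that has no ':', and always keep the tail from position n-1.
def keepSpec (l : List String) : List String :=
  (l.take (l.length - 1)).filter (fun s => PySem.Str.find s ":" = -1) ++ l.drop (l.length - 1)

theorem map_getD_range_eq_take (l : List String) (k : Nat) (hk : k ≤ l.length) :
    (List.range k).map (fun i => l.getD i "") = l.take k := by
  apply List.ext_getElem
  · simp [Nat.min_eq_left hk]
  · intro i h1 h2
    simp at h1 ⊢
    rw [List.getElem?_eq_getElem (by omega : i < l.length)]
    rfl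

-- popping a reversed list of filtered indices < k removes exactly those positions
theorem popFold_filter (q : Nat → Bool) : ∀ (k : Nat) (l : List String), k ≤ l.length →
    ((((List.range k).filter q).reverse).map (fun j : Nat => (j : Int))).foldl
      (fun d i => match PySem.List.pop? d i with | some r => r.2 | none => d) l
    = ((List.range k).filter (fun i => !q i)).map (fun i => l.getD i "") ++ l.drop k := by
  intro k
  induction k with
  | zero => intro l _; simp
  | succ k ih =>
    intro l hk
    rw [List.range_succ]
    simp only [List.filter_append, List.filter_singleton, List.map_append]
    by_cases hq : q k = true
    · have hpop : PySem.List.pop? l (k : Int) = some (l[k]'(by omega), l.eraseIdx k) :=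
        PySem.List.pop?_natCast l k (by omega)
      simp only [hq, Bool.not_true, Bool.cond_true, Bool.cond_false, List.reverse_append,
        List.reverse_cons, List.reverse_nil, List.nil_append, List.map_cons, List.map_nil,
        List.map_append, List.append_nil]
      rw [List.singleton_append, List.foldl_cons]
      simp only [hpop]
      rw [ih (l.eraseIdx k) (by rw [List.length_eraseIdx_of_lt (by omega)]; omega)]
      rw [List.eraseIdx_eq_take_drop_succ]
      have hdrop : (List.take k l ++ List.drop (k + 1) l).drop k = l.drop (k + 1) := by
        rw [List.drop_append_of_le_length (by simp; omega)]
        simp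
      rw [hdrop]
      congr 1
      apply List.map_congr_left
      intro i hi
      simp only [List.mem_filter, List.mem_range] at hi
      rw [List.getD_eq_getElem?_getD, List.getD_eq_getElem?_getD,
          List.getElem?_append_left (by simp; omega)]
      rw [List.getElem?_take_of_lt hi.1]
    · have hq' : q k = false := by simpa using hq
      simp only [hq', Bool.not_false, Bool.cond_true, Bool.cond_false,
        List.map_cons, List.map_nil, List.append_nil]
      rw [ih l (by omega)]
      rw [List.drop_eq_getElem_cons (by omega : k < l.length)]
      simp only [List.append_assoc, List.singleton_append]
      congr 2
      rw [List.getD_eq_getElem?_getD, List.getElem?_eq_getElem (by omega : k < l.length)]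
      rfl

theorem clean_labels_eq_keepSpec (l : List String) : clean_labels l = keepSpec l := by
  rcases Nat.eq_zero_or_pos l.length with h0 | hpos
  · rw [List.eq_nil_of_length_eq_zero h0]; decide
  · simp only [clean_labels]
    have hcast : (l.length : Int) - 1 = ((l.length - 1 : Nat) : Int) := by omega
    rw [hcast, PySem.List.pyRange_zero_natCast, List.foldl_map]
    simp only [PySem.List.pyGetD_natCast]
    rw [PySem.List.foldl_append_ite
      (fun i : Nat => PySem.Str.find (l.getD i "") ":" ≠ -1) (fun i : Nat => (i : Int))]
    rw [List.nil_append, PySem.List.slice?_none_none_neg_one, Option.getD_some,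
      ← List.map_reverse]
    rw [popFold_filter _ (l.length - 1) l (by omega)]
    unfold keepSpec
    congr 1
    rw [← map_getD_range_eq_take l (l.length - 1) (by omega), List.filter_map]
    congr 1
    apply List.filter_congr
    intro i _
    simp [Function.comp, decide_not]

theorem clean_labels_alt_eq_keepSpec (l : List String) : clean_labels_alt l = keepSpec l := by
  rcases Nat.eq_zero_or_pos l.length with h0 | hpos
  · rw [List.eq_nil_of_length_eq_zero h0]; decide
  · simp only [clean_labels_alt]
    rw [PySem.List.pyRange_zero_natCast, List.foldl_map]
    simp only [PySem.List.pyGetD_natCast]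
    have hsplit : l.length = (l.length - 1) + 1 := by omega
    rw [show List.range l.length = List.range ((l.length - 1) + 1) from by rw [← hsplit],
      List.range_succ, List.foldl_append, List.foldl_cons, List.foldl_nil]
    rw [PySem.List.foldl_congr_mem (List.range (l.length - 1)) _
      (fun acc i => if PySem.Str.find (l.getD i "") ":" = -1 then acc ++ [l.getD i ""] else acc) []
      (by
        intro acc i hi
        simp only [List.mem_range] at hi
        have : ¬ ((i : Int) = (l.length : Int) - 1) := by omega
        simp [this])]
    have hlast : ((l.length - 1 : Nat) : Int) = (l.length : Int) - 1 := by omega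
    rw [if_pos (Or.inl hlast)]
    unfold keepSpec
    have hfold : List.foldl
        (fun acc i => if PySem.Str.find (l.getD i "") ":" = -1 then acc ++ [l.getD i ""] else acc)
        [] (List.range (l.length - 1))
      = ((List.range (l.length - 1)).map (fun i => l.getD i "")).foldl
          (fun acc s => if PySem.Str.find s ":" = -1 then acc ++ [s] else acc) [] :=
      (@List.foldl_map Nat String (List String) (fun i => l.getD i "")
        (fun acc s => if PySem.Str.find s ":" = -1 then acc ++ [s] else acc)
        (List.range (l.length - 1)) []).symm
    rw [hfold, map_getD_range_eq_take l (l.length - 1) (by omega),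
        PySem.List.foldl_append_ite_eq_filter
          (fun s => PySem.Str.find s ":" = -1) (l.take (l.length - 1)) [],
        List.nil_append]
    congr 1
    rw [List.drop_eq_getElem_cons (by omega : l.length - 1 < l.length)]
    rw [show (l.length - 1) + 1 = l.length from by omega, List.drop_length]
    rw [List.getD_eq_getElem?_getD, List.getElem?_eq_getElem (by omega : l.length - 1 < l.length)]
    rfl

-- ===== VERDICT (by name: the statement is the Claim_ definition above) =====
theorem clean_labels_spec : Claim_equal_clean_labels := by
  intro data _
  unfold Spec_clean_labels
  rw [clean_labels_eq_keepSpec, clean_labels_alt_eq_keepSpec]
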